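-- pv_equiv track=rewrite | github.com/david12345abc/DashboardBack | getkpi/calc_fot.py | get_fot_plan
-- ===== SOURCE A (Python) =====
-- FOT_PLAN: dict[str, list[float]] = {
--     "bd7b5184-9f9c-11e4-80da-001e67112509": [  # Газпром
--         577_789, 577_789, 580_349, 615_029, 577_789, 577_789,
--         621_251, 692_784, 577_789, 613_498, 656_252, 802_249,
--     ],
--     "639ec87b-67b6-11eb-8523-ac1f6b05524d": [  # ОРКК
--         922_276, 927_551, 986_010, 1_055_422, 937_222, 922_276,
--         1_051_636, 1_149_762, 977_822, 1_064_818, 969_256, 1_222_426,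
--     ],
--     "49480c10-e401-11e8-8283-ac1f6b05524d": [  # ВЭД
--         836_850, 986_850, 986_850, 1_095_243, 1_030_825, 986_850,
--         1_050_739, 1_096_743, 1_113_826, 1_051_723, 1_025_426, 1_270_035,
--     ],
--     "7587c178-92f6-11f0-96f9-6cb31113810e": [  # ОДП
--         1_517_715, 1_517_715, 1_541_130, 1_614_760, 1_517_715, 1_629_485,
--         1_559_889, 1_637_533, 1_589_336, 1_544_183, 1_579_311, 1_690_094,
--     ],
--     "34497ef7-810f-11e4-80d6-001e67112509": [  # ОПЭОиУ
--         897_710, 891_185, 924_207, 924_765, 888_314, 932_112,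
--         1_022_207, 906_062, 899_222, 998_444, 935_816, 1_016_310,
--     ],
--     "9edaa7d4-37a5-11ee-93d3-6cb31113810e": [  # БМИ
--         662_288, 674_252, 709_603, 662_288, 670_976, 723_486,
--         685_868, 662_288, 662_288, 706_841, 671_684, 662_288,
--     ],
--     "95dfd1c6-37a4-11ee-93d3-6cb31113810e": [  # PR
--         271_527, 254_803, 255_421, 279_418, 255_421, 255_421,
--         322_149, 259_523, 255_421, 258_624, 255_421, 255_421,
--     ],
--     "1c9f9419-d91b-11e0-8129-cd2988c3db2d": [  # Тендерный отдел
--         341_460, 341_460, 522_529, 367_294, 352_844, 535_252,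
--         366_463, 341_460, 522_529, 376_401, 364_705, 522_529,
--     ],
-- }
--
-- KOMDIR_OWN_PLAN: list[float] = [  # Коммерческий директор (собственные расходы)
--     1_013_594, 1_042_372, 1_463_819, 989_490, 1_013_594, 1_539_322,
--     1_063_397, 1_079_589, 1_504_007, 1_011_476, 1_019_662, 1_816_999,
-- ]
--
-- def get_fot_plan(month: int, dept_guid: str | None = None) -> float:
--     """План ФОТ для месяца (1-12).
--     dept_guid=None → сумма всех отделов + комдир.
--     dept_guid='…'  → план конкретного отдела.
--     """
--     idx = month - 1
--     if dept_guid is not None: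
--         plan_list = FOT_PLAN.get(dept_guid)
--         return plan_list[idx] if plan_list and 0 <= idx < len(plan_list) else 0
--     total = KOMDIR_OWN_PLAN[idx] if 0 <= idx < 12 else 0
--     for plan_list in FOT_PLAN.values():
--         if 0 <= idx < len(plan_list):
--             total += plan_list[idx]
--     return total
-- ===== SOURCE B (Python) =====
-- FOT_PLAN: dict[str, list[float]] = {
--     "bd7b5184-9f9c-11e4-80da-001e67112509": [  # Газпром
--         577_789, 577_789, 580_349, 615_029, 577_789, 577_789,
--         621_251, 692_784, 577_789, 613_498, 656_252, 802_249,
--     ],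
--     "639ec87b-67b6-11eb-8523-ac1f6b05524d": [  # ОРКК
--         922_276, 927_551, 986_010, 1_055_422, 937_222, 922_276,
--         1_051_636, 1_149_762, 977_822, 1_064_818, 969_256, 1_222_426,
--     ],
--     "49480c10-e401-11e8-8283-ac1f6b05524d": [  # ВЭД
--         836_850, 986_850, 986_850, 1_095_243, 1_030_825, 986_850,
--         1_050_739, 1_096_743, 1_113_826, 1_051_723, 1_025_426, 1_270_035,
--     ],
--     "7587c178-92f6-11f0-96f9-6cb31113810e": [  # ОДП
--         1_517_715, 1_517_715, 1_541_130, 1_614_760, 1_517_715, 1_629_485,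
--         1_559_889, 1_637_533, 1_589_336, 1_544_183, 1_579_311, 1_690_094,
--     ],
--     "34497ef7-810f-11e4-80d6-001e67112509": [  # ОПЭОиУ
--         897_710, 891_185, 924_207, 924_765, 888_314, 932_112,
--         1_022_207, 906_062, 899_222, 998_444, 935_816, 1_016_310,
--     ],
--     "9edaa7d4-37a5-11ee-93d3-6cb31113810e": [  # БМИ
--         662_288, 674_252, 709_603, 662_288, 670_976, 723_486,
--         685_868, 662_288, 662_288, 706_841, 671_684, 662_288,
--     ],
--     "95dfd1c6-37a4-11ee-93d3-6cb31113810e": [  # PR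
--         271_527, 254_803, 255_421, 279_418, 255_421, 255_421,
--         322_149, 259_523, 255_421, 258_624, 255_421, 255_421,
--     ],
--     "1c9f9419-d91b-11e0-8129-cd2988c3db2d": [  # Тендерный отдел
--         341_460, 341_460, 522_529, 367_294, 352_844, 535_252,
--         366_463, 341_460, 522_529, 376_401, 364_705, 522_529,
--     ],
-- }
--
-- KOMDIR_OWN_PLAN: list[float] = [  # Коммерческий директор (собственные расходы)
--     1_013_594, 1_042_372, 1_463_819, 989_490, 1_013_594, 1_539_322,
--     1_063_397, 1_079_589, 1_504_007, 1_011_476, 1_019_662, 1_816_999,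
-- ]
--
-- # Precomputed at module load: month-wise grand total (komdir + all departments).
-- MONTHLY_TOTAL: list[float] = [
--     KOMDIR_OWN_PLAN[i] + sum(pl[i] for pl in FOT_PLAN.values())
--     for i in range(12)
-- ]
--
-- def get_fot_plan(month: int, dept_guid: str | None = None) -> float:
--     idx = month - 1
--     if dept_guid is not None:
--         plan_list = FOT_PLAN.get(dept_guid)
--         return plan_list[idx] if plan_list and 0 <= idx < len(plan_list) else 0
--     return MONTHLY_TOTAL[idx] if 0 <= idx < 12 else 0
-- ===== Notes on version B (the rewrite author's own statement) =====
-- stated objective: simpler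
-- what changed: The dept_guid=None branch's per-call accumulation loop over all departments is replaced by a single lookup into MONTHLY_TOTAL, a length-12 table of grand totals precomputed once at module load; the dept_guid branch is unchanged.
import Mathlib
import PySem

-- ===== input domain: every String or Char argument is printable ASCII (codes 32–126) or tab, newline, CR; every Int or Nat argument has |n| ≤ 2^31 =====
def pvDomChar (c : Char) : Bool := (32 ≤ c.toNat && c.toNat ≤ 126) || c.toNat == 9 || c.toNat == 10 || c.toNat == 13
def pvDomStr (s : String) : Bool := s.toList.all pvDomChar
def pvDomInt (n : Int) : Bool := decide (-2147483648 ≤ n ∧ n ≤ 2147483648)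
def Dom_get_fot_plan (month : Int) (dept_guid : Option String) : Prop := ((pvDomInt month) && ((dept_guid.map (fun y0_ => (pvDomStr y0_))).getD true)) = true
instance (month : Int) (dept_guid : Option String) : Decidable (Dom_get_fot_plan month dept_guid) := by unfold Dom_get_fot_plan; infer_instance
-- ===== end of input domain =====

-- B precomputes the 12 monthly grand totals once (a table lookup), instead of A's per-call
-- accumulation loop over the departments; the dept_guid branch is unchanged.  Objective: simpler.

-- ===== PORT A =====
-- module-level constant tables (shared context of both implementations)
def FOT_PLAN : PySem.Dict String (List Int) := PySem.Dict.mk [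
  ("bd7b5184-9f9c-11e4-80da-001e67112509",
    [577789, 577789, 580349, 615029, 577789, 577789,
     621251, 692784, 577789, 613498, 656252, 802249]),
  ("639ec87b-67b6-11eb-8523-ac1f6b05524d",
    [922276, 927551, 986010, 1055422, 937222, 922276,
     1051636, 1149762, 977822, 1064818, 969256, 1222426]),
  ("49480c10-e401-11e8-8283-ac1f6b05524d",
    [836850, 986850, 986850, 1095243, 1030825, 986850,
     1050739, 1096743, 1113826, 1051723, 1025426, 1270035]),
  ("7587c178-92f6-11f0-96f9-6cb31113810e",
    [1517715, 1517715, 1541130, 1614760, 1517715, 1629485,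
     1559889, 1637533, 1589336, 1544183, 1579311, 1690094]),
  ("34497ef7-810f-11e4-80d6-001e67112509",
    [897710, 891185, 924207, 924765, 888314, 932112,
     1022207, 906062, 899222, 998444, 935816, 1016310]),
  ("9edaa7d4-37a5-11ee-93d3-6cb31113810e",
    [662288, 674252, 709603, 662288, 670976, 723486,
     685868, 662288, 662288, 706841, 671684, 662288]),
  ("95dfd1c6-37a4-11ee-93d3-6cb31113810e",
    [271527, 254803, 255421, 279418, 255421, 255421,
     322149, 259523, 255421, 258624, 255421, 255421]),
  ("1c9f9419-d91b-11e0-8129-cd2988c3db2d",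
    [341460, 341460, 522529, 367294, 352844, 535252,
     366463, 341460, 522529, 376401, 364705, 522529])]

def KOMDIR_OWN_PLAN : List Int :=
  [1013594, 1042372, 1463819, 989490, 1013594, 1539322,
   1063397, 1079589, 1504007, 1011476, 1019662, 1816999]

def get_fot_plan (month : Int) (dept_guid : Option String) : Int :=
  let idx := month - 1
  match dept_guid with
  | some g =>
    match FOT_PLAN.get? g with
    | some plan_list =>
        if plan_list ≠ [] ∧ 0 ≤ idx ∧ idx < (plan_list.length : Int) then
          (PySem.List.pyGet? plan_list idx).getD 0
        else 0
    | none => 0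
  | none =>
    let total := if 0 ≤ idx ∧ idx < 12 then (PySem.List.pyGet? KOMDIR_OWN_PLAN idx).getD 0 else 0
    FOT_PLAN.values.foldl (fun total plan_list =>
      if 0 ≤ idx ∧ idx < (plan_list.length : Int) then
        total + (PySem.List.pyGet? plan_list idx).getD 0
      else total) total

-- ===== PORT B =====
-- precomputed at module load: month-wise grand total (komdir + all departments)
def MONTHLY_TOTAL : List Int :=
  (PySem.List.pyRange 0 12 1).map (fun i =>
    (PySem.List.pyGet? KOMDIR_OWN_PLAN i).getD 0 +
    (FOT_PLAN.values.map (fun pl => (PySem.List.pyGet? pl i).getD 0)).sum)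

def get_fot_plan_alt (month : Int) (dept_guid : Option String) : Int :=
  let idx := month - 1
  match dept_guid with
  | some g =>
    match FOT_PLAN.get? g with
    | some plan_list =>
        if plan_list ≠ [] ∧ 0 ≤ idx ∧ idx < (plan_list.length : Int) then
          (PySem.List.pyGet? plan_list idx).getD 0
        else 0
    | none => 0
  | none =>
    if 0 ≤ idx ∧ idx < 12 then (PySem.List.pyGet? MONTHLY_TOTAL idx).getD 0 else 0

-- ===== PRECONDITION & SPEC =====
def Spec_get_fot_plan (month : Int) (dept_guid : Option String) (out : Int) : Prop := out = get_fot_plan_alt month dept_guid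
instance (month : Int) (dept_guid : Option String) (out : Int) : Decidable (Spec_get_fot_plan month dept_guid out) := by unfold Spec_get_fot_plan; infer_instance

-- ===== CLAIM (what is proved, stated in full; the proofs are below) =====
def Claim_equal_get_fot_plan : Prop := ∀ (month : Int) (dept_guid : Option String), Dom_get_fot_plan month dept_guid → Spec_get_fot_plan month dept_guid (get_fot_plan month dept_guid)

-- ===== LEMMAS AND PROOFS =====

-- the None branch agrees for every month (in range: 12 kernel computations; out of range: both 0)
lemma none_branch_eq (month : Int) : get_fot_plan month none = get_fot_plan_alt month none := by
  by_cases h : 1 ≤ month ∧ month ≤ 12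
  · obtain ⟨h1, h2⟩ := h
    interval_cases month <;> decide
  · simp only [get_fot_plan, get_fot_plan_alt, FOT_PLAN, KOMDIR_OWN_PLAN,
      PySem.Dict.values_mk]
    norm_num
    split_ifs <;> omega

-- ===== VERDICT (by name: the statement is the Claim_ definition above) =====
theorem get_fot_plan_spec : Claim_equal_get_fot_plan := by
  intro month dept_guid _
  unfold Spec_get_fot_plan
  cases dept_guid with
  | none => exact none_branch_eq month
  | some g => rfl
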